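-- pv_equiv track=rewrite | github.com/MrBrantCode/unitest_baseline | mut_generate/mist_train_cf/cf_73516/solution.py | sum_of_uniques
-- ===== SOURCE A (Python) =====
-- def sum_of_uniques(limit):
--     def is_prime(n):
--         if n == 1 or n % 2 == 0:
--             return n == 2
--         d = 3
--         while d * d <= n:
--             if n % d == 0:
--                 return False
--             d += 2
--         return True
--
--     def is_unique(n):
--         return len(str(n)) == len(set(str(n)))
--
--     return sum(i for i in range(2, limit) if is_prime(i) and is_unique(i))
-- ===== SOURCE B (Python) =====
-- def sum_of_uniques(limit):
--     def is_unique(n):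
--         return len(str(n)) == len(set(str(n)))
--
--     primes = []  # all primes found so far, in increasing order
--     total = 0
--     for i in range(2, limit):
--         composite = False
--         for p in primes:
--             if p * p > i:
--                 break
--             if i % p == 0:
--                 composite = True
--                 break
--         if not composite:
--             primes.append(i)
--             if is_unique(i):
--                 total += i
--     return total
-- ===== Notes on version B (the rewrite author's own statement) =====
-- stated objective: faster
-- what changed: B replaces A's per-number trial division by all odd d up to sqrt(i) with an incrementally maintained increasing list of primes found so far, testing each candidate only against primes p with p*p <= i; the digit-uniqueness check is unchanged.
import Mathlib
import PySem

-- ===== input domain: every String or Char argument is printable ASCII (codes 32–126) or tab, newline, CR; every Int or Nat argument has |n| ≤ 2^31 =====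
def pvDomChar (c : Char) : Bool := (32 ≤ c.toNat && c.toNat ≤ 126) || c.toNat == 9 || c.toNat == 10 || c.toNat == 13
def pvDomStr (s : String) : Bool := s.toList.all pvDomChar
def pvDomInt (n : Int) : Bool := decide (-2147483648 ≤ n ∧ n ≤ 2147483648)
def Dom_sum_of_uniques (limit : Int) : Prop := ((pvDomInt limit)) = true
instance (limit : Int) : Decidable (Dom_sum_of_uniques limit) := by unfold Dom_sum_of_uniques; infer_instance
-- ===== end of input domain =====

-- B replaces A's per-number odd trial division with an incrementally maintained
-- increasing prime list, testing each candidate only against primes p with p*p ≤ i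
-- (objective: faster, constant-factor — measured; same return value everywhere).


-- ===== PORT A =====
-- is_unique: len(str(n)) == len(set(str(n)))  (identical helper in A and in B's source)
def pvIsUnique (n : Int) : Bool :=
  PySem.Str.len (PySem.Int.toStr n) == PySem.Set.len (PySem.Set.ofList (PySem.Int.toStr n).toList)

-- the 'while d * d <= n' loop of A's is_prime
def pvIsPrimeLoopA (n d : Int) : Bool :=
  if d * d ≤ n then
    if PySem.Int.mod n d == 0 then false
    else pvIsPrimeLoopA n (d + 2)
  else true
termination_by (n + 1 - d).toNat
decreasing_by
  rename_i h _
  have hd : d ≤ d * d := by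
    by_cases h1 : 1 ≤ d
    · nlinarith
    · have : 0 ≤ d * d := mul_self_nonneg d
      omega
  omega

def pvIsPrimeA (n : Int) : Bool :=
  if n == 1 || PySem.Int.mod n 2 == 0 then n == 2
  else pvIsPrimeLoopA n 3

def sum_of_uniques (limit : Int) : Int :=
  (PySem.List.pyRange 2 limit 1).foldl
    (fun acc i => if pvIsPrimeA i && pvIsUnique i then acc + i else acc) 0

-- ===== PORT B =====
-- inner 'for p in primes' loop with its two breaks: does some prime p with p*p ≤ i divide i?
def pvFirstDividesB (i : Int) : List Int → Bool
  | [] => false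
  | p :: ps =>
    if p * p > i then false
    else if PySem.Int.mod i p == 0 then true
    else pvFirstDividesB i ps

-- one iteration of B's outer loop over (primes, total)
def pvStepB (st : List Int × Int) (i : Int) : List Int × Int :=
  if pvFirstDividesB i st.1 then st
  else (st.1 ++ [i], if pvIsUnique i then st.2 + i else st.2)

def sum_of_uniques_alt (limit : Int) : Int :=
  ((PySem.List.pyRange 2 limit 1).foldl pvStepB ([], 0)).2

-- ===== PRECONDITION & SPEC =====
def Spec_sum_of_uniques (limit : Int) (out : Int) : Prop := out = sum_of_uniques_alt limit
instance (limit : Int) (out : Int) : Decidable (Spec_sum_of_uniques limit out) := by unfold Spec_sum_of_uniques; infer_instance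

-- ===== CLAIM (what is proved, stated in full; the proofs are below) =====
def Claim_equal_sum_of_uniques : Prop := ∀ (limit : Int), Dom_sum_of_uniques limit → Spec_sum_of_uniques limit (sum_of_uniques limit)

-- ===== LEMMAS AND PROOFS =====

-- reference primality predicate used only in the proofs
def pvP (i : Int) : Bool := decide (Nat.Prime i.toNat)

-- a divisor 2 ≤ p < i refutes primality of i
lemma pv_not_prime_of_dvd {p i : Int} (hp2 : 2 ≤ p) (hpi : p < i) (hdvd : p ∣ i) :
    pvP i = false := by
  have hi0 : (0:Int) ≤ i := by omega
  have hp0 : (0:Int) ≤ p := by omega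
  have hdvd' : p.toNat ∣ i.toNat := by
    rcases hdvd with ⟨c, hc⟩
    have hc0 : 0 < c := by nlinarith
    refine ⟨c.toNat, ?_⟩
    have : (i.toNat : Int) = (p.toNat : Int) * (c.toNat : Int) := by
      rw [Int.toNat_of_nonneg hi0, Int.toNat_of_nonneg hp0,
        Int.toNat_of_nonneg (by omega)]
      exact hc
    exact_mod_cast this
  simp only [pvP, decide_eq_false_iff_not]
  intro hpr
  rcases hpr.eq_one_or_self_of_dvd _ hdvd' with h | h <;> omega

-- a non-prime i ≥ 2 has a prime divisor q with q*q ≤ i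
lemma pv_minFac_facts {i : Int} (hi : 2 ≤ i) (hnp : pvP i = false) :
    ∃ q : Int, 2 ≤ q ∧ q * q ≤ i ∧ q ∣ i ∧ pvP q = true := by
  simp only [pvP, decide_eq_false_iff_not] at hnp
  set m := i.toNat with hm
  have hm2 : 2 ≤ m := by omega
  have hq : Nat.Prime m.minFac := Nat.minFac_prime (by omega)
  have hsq : m.minFac ^ 2 ≤ m := Nat.minFac_sq_le_self (by omega) hnp
  refine ⟨(m.minFac : Int), by exact_mod_cast hq.two_le, ?_, ?_, ?_⟩
  · have : (m.minFac * m.minFac : Int) ≤ (m : Int) := by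
      exact_mod_cast (by nlinarith [hsq] : m.minFac * m.minFac ≤ m)
    omega
  · have : (m.minFac : Int) ∣ (m : Int) := Int.natCast_dvd_natCast.mpr (Nat.minFac_dvd m)
    have him : (m : Int) = i := by omega
    rwa [him] at this
  · simp only [pvP, decide_eq_true_eq]
    have : ((m.minFac : Int)).toNat = m.minFac := by omega
    rwa [this]

-- ---- B side: the scan over the prime list computes non-primality ----

lemma pvFirstDividesB_false {i : Int} (Ps : List Int)
    (h : ∀ p ∈ Ps, 0 < p ∧ (p * p ≤ i → PySem.Int.mod i p ≠ 0)) :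
    pvFirstDividesB i Ps = false := by
  induction Ps with
  | nil => rfl
  | cons p ps ih =>
    have hp := h p (by simp)
    simp only [pvFirstDividesB]
    split_ifs with h1 h2
    · rfl
    · exact absurd (by simpa using h2) (hp.2 (by omega))
    · exact ih fun q hq => h q (by simp [hq])

lemma pvFirstDividesB_true {i q : Int} (Ps : List Int)
    (hq : q ∈ Ps) (hge : ∀ p ∈ Ps, 2 ≤ p) (hsort : Ps.Pairwise (· < ·))
    (hqq : q * q ≤ i) (hmod : PySem.Int.mod i q = 0) :
    pvFirstDividesB i Ps = true := by
  induction Ps with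
  | nil => simp at hq
  | cons p ps ih =>
    simp only [pvFirstDividesB]
    rcases List.mem_cons.mp hq with rfl | hq'
    · have : ¬ (q * q > i) := by omega
      simp [this, hmod]
    · have hplt : p < q := (List.pairwise_cons.mp hsort).1 q hq'
      have hp2 : 2 ≤ p := hge p (by simp)
      have hppi : p * p ≤ i := by nlinarith
      have : ¬ (p * p > i) := by omega
      simp only [this, if_false]
      split_ifs with h2
      · rfl
      · exact ih hq' (fun r hr => hge r (by simp [hr])) (List.pairwise_cons.mp hsort).2

lemma pvScan {i : Int} (hi : 2 ≤ i) (Ps : List Int)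
    (hmem : ∀ p, p ∈ Ps ↔ (2 ≤ p ∧ p < i ∧ pvP p = true))
    (hsort : Ps.Pairwise (· < ·)) :
    pvFirstDividesB i Ps = !pvP i := by
  cases hP : pvP i with
  | true =>
    simp only [Bool.not_true]
    apply pvFirstDividesB_false
    intro p hp
    have h := (hmem p).mp hp
    refine ⟨by omega, fun hpp hmod => ?_⟩
    have hdvd : p ∣ i := (PySem.Int.mod_eq_zero_iff_dvd i p).mp hmod
    have := pv_not_prime_of_dvd h.1 h.2.1 hdvd
    rw [hP] at this; exact absurd this (by simp)
  | false =>
    simp only [Bool.not_false]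
    obtain ⟨q, hq2, hqq, hqdvd, hqP⟩ := pv_minFac_facts hi hP
    have hqlt : q < i := by nlinarith
    exact pvFirstDividesB_true Ps ((hmem q).mpr ⟨hq2, hqlt, hqP⟩)
      (fun p hp => ((hmem p).mp hp).1) hsort hqq
      ((PySem.Int.mod_eq_zero_iff_dvd i q).mpr hqdvd)

-- ---- A side: the while loop computes primality for odd n ≥ 3 ----

lemma pvLoopA_char (n : Int) :
    ∀ d : Int, 0 < d → d % 2 = 1 →
    (pvIsPrimeLoopA n d = true ↔
      ∀ e : Int, d ≤ e → e % 2 = 1 → e * e ≤ n → PySem.Int.mod n e ≠ 0) := by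
  intro d
  induction d using pvIsPrimeLoopA.induct n with
  | case1 d hle hmod =>
    intro hd hodd
    have hmod' : PySem.Int.mod n d = 0 := by simpa using hmod
    rw [pvIsPrimeLoopA, if_pos hle, if_pos hmod]
    constructor
    · intro h; simp at h
    · intro h; exact ((h d le_rfl hodd hle) hmod').elim
  | case2 d hle hmod ih =>
    intro hd hodd
    have hmod' : PySem.Int.mod n d ≠ 0 := by simpa using hmod
    rw [pvIsPrimeLoopA, if_pos hle, if_neg hmod]
    rw [ih (by omega) (by omega)]
    constructor
    · intro h e he heodd hee
      by_cases h1 : d + 2 ≤ e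
      · exact h e h1 heodd hee
      · have : e = d ∨ e = d + 1 := by omega
        rcases this with rfl | rfl
        · exact hmod'
        · omega
    · intro h e he heodd hee
      exact h e (by omega) heodd hee
  | case3 d hgt =>
    intro hd hodd
    rw [pvIsPrimeLoopA, if_neg hgt]
    constructor
    · intro _ e he heodd hee
      have : d * d ≤ e * e := by nlinarith
      omega
    · intro _; simp

lemma pvIsPrimeA_eq (i : Int) (hi : 2 ≤ i) : pvIsPrimeA i = pvP i := by
  unfold pvIsPrimeA
  rcases Int.emod_two_eq_zero_or_one i with heven | hodd
  · -- even: the first branch fires, result is (i == 2)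
    have hm : PySem.Int.mod i 2 = 0 := by
      rw [PySem.Int.mod_eq_emod_of_pos (by norm_num)]; exact heven
    have hc : (i == 1 || PySem.Int.mod i 2 == 0) = true := by
      simp
      exact Or.inr (Int.dvd_of_emod_eq_zero heven)
    rw [if_pos hc]
    rcases eq_or_lt_of_le hi with rfl | hgt
    · simpa [pvP] using Nat.prime_two
    · have hdvd : (2:Int) ∣ i := Int.dvd_of_emod_eq_zero heven
      have hnp := pv_not_prime_of_dvd (by norm_num) hgt hdvd
      rw [hnp]; simp; omega
  · -- odd, hence i ≥ 3: the while loop runs from d = 3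
    have hi3 : 3 ≤ i := by omega
    have hm : PySem.Int.mod i 2 ≠ 0 := by
      rw [PySem.Int.mod_eq_emod_of_pos (by norm_num)]; omega
    have hc : (i == 1 || PySem.Int.mod i 2 == 0) = false := by
      simp
      exact ⟨by omega, hodd⟩
    rw [if_neg (by rw [hc]; simp)]
    have hchar := pvLoopA_char i 3 (by norm_num) (by norm_num)
    cases hP : pvP i with
    | true =>
      rw [hchar.mpr]
      intro e he heodd hee hmod
      have hdvd : e ∣ i := (PySem.Int.mod_eq_zero_iff_dvd i e).mp hmod
      have helt : e < i := by nlinarith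
      have := pv_not_prime_of_dvd (by omega) helt hdvd
      rw [hP] at this; exact absurd this (by simp)
    | false =>
      obtain ⟨q, hq2, hqq, hqdvd, hqP⟩ := pv_minFac_facts hi hP
      have hqodd : q % 2 = 1 := by
        rcases Int.emod_two_eq_zero_or_one q with h2 | h2
        · exfalso
          have h2dvd : (2:Int) ∣ q := Int.dvd_of_emod_eq_zero h2
          have : (2:Int) ∣ i := dvd_trans h2dvd hqdvd
          have := Int.emod_emod_of_dvd i (dvd_refl 2)
          omega
        · exact h2
      have hq3 : 3 ≤ q := by omega
      cases hL : pvIsPrimeLoopA i 3 with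
      | false => rfl
      | true =>
        exfalso
        exact (hchar.mp hL) q hq3 hqodd hqq
          ((PySem.Int.mod_eq_zero_iff_dvd i q).mpr hqdvd)

-- ---- the outer loops agree ----

lemma pvInv : ∀ (k : Nat) (m : Int), m ≤ 2 + (k : Int) →
    (PySem.List.pyRange 2 m 1).foldl pvStepB ([], 0)
      = ((PySem.List.pyRange 2 m 1).filter pvP,
         (PySem.List.pyRange 2 m 1).foldl
           (fun acc i => if pvP i && pvIsUnique i then acc + i else acc) 0) := by
  intro k
  induction k with
  | zero =>
    intro m hm
    rw [PySem.List.pyRange_one_eq_nil (by omega)]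
    rfl
  | succ k ih =>
    intro m hm
    by_cases hle : m ≤ 2 + (k : Int)
    · exact ih m hle
    · have h2m : 2 ≤ m - 1 := by push_cast at hle hm ⊢; omega
      have hsplit : PySem.List.pyRange 2 m 1
          = PySem.List.pyRange 2 (m - 1) 1 ++ [m - 1] := by
        have h := PySem.List.pyRange_one_succ_right (a := 2) (b := m - 1) (by omega)
        rw [show m - 1 + 1 = m by omega] at h
        exact h
      rw [hsplit, List.foldl_append, List.foldl_append, List.filter_append,
        ih (m - 1) (by push_cast at hle hm ⊢; omega)]
      have hmem : ∀ p, p ∈ (PySem.List.pyRange 2 (m - 1) 1).filter pvP ↔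
          (2 ≤ p ∧ p < m - 1 ∧ pvP p = true) := by
        intro p
        simp [List.mem_filter, PySem.List.mem_pyRange_one, and_assoc]
      have hsort : ((PySem.List.pyRange 2 (m - 1) 1).filter pvP).Pairwise (· < ·) :=
        (PySem.List.pairwise_lt_pyRange_one 2 (m - 1)).filter pvP
      have hscan := pvScan h2m _ hmem hsort
      simp only [List.foldl_cons, List.foldl_nil, List.filter_cons, pvStepB, hscan]
      cases hP : pvP (m - 1) with
      | true => simp
      | false => simp

-- ===== VERDICT (by name: the statement is the Claim_ definition above) =====
theorem sum_of_uniques_spec : Claim_equal_sum_of_uniques := by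
  intro limit _
  unfold Spec_sum_of_uniques sum_of_uniques sum_of_uniques_alt
  rw [PySem.List.foldl_congr_mem _
      (fun acc i => if pvIsPrimeA i && pvIsUnique i then acc + i else acc)
      (fun acc i => if pvP i && pvIsUnique i then acc + i else acc) 0
      (by
        intro acc x hx
        have hx2 : 2 ≤ x := (PySem.List.mem_pyRange_one.mp hx).1
        simp only [pvIsPrimeA_eq x hx2])]
  rw [pvInv (limit - 2).toNat limit (by omega)]
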